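-- pv_equiv track=rewrite | github.com/zaizaizhao/easysql | easysql_api/services/chart_aggregation.py | _is_grouped_once
-- ===== SOURCE A (Python) =====
-- from typing import Any, cast
--
-- def _is_grouped_once(rows: list[dict[str, Any]], group_by: str, sample_size: int = 50) -> bool:
--     if not rows:
--         return False
--     sample = rows[:sample_size]
--     counts: dict[str, int] = {}
--     for row in sample:
--         key = row.get(group_by)
--         key_str = "NULL" if key is None else str(key)
--         counts[key_str] = counts.get(key_str, 0) + 1
--         if counts[key_str] > 1:
--             return False
--     return True
-- ===== SOURCE B (Python) =====
-- def _is_grouped_once(rows: list, group_by: str, sample_size: int = 50) -> bool: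
--     if not rows:
--         return False
--     sample = rows[:sample_size]
--     keys = sorted("NULL" if row.get(group_by) is None else str(row.get(group_by)) for row in sample)
--     return all(a != b for a, b in zip(keys, keys[1:]))
-- ===== Notes on version B (the rewrite author's own statement) =====
-- stated objective: alternative
-- what changed: Replaced the hash-based counting dict with early exit by sort-then-scan: sort the normalized keys and check that no two adjacent sorted keys are equal.
import Mathlib
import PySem

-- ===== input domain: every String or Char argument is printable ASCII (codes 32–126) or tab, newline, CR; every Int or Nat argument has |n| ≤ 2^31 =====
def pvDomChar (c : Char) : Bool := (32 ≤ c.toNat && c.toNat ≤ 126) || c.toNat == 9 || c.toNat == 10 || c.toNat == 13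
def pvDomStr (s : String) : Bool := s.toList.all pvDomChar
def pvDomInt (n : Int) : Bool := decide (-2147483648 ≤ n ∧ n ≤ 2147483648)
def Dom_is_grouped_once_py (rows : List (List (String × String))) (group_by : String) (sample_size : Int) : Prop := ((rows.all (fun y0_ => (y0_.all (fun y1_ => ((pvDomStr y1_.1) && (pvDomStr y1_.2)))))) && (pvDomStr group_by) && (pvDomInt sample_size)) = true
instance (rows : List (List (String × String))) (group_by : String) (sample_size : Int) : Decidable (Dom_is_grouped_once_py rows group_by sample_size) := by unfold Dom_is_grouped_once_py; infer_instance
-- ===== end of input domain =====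

-- B replaces A's counting dict with early exit by sorting the normalized keys and scanning adjacent pairs (alternative algorithm; sort-then-scan).


-- ===== PORT A =====
-- the loop 'for row in sample: …' with the counting dict and the early 'return False'
def pvLoopA (group_by : String) : List (List (String × String)) → PySem.Dict String Int → Bool
  | [], _ => true
  | row :: rest, counts =>
      -- key = row.get(group_by); key_str = "NULL" if key is None else str(key)  (values are strings, str is identity)
      let key_str : String := match (PySem.Dict.mk row).get? group_by with
        | none => "NULL"
        | some v => v
      let counts' := counts.insert key_str (counts.getD key_str 0 + 1)
      if 1 < counts'.getD key_str 0 then false else pvLoopA group_by rest counts'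

def is_grouped_once_py (rows : List (List (String × String))) (group_by : String) (sample_size : Int) : Bool :=
  if rows.isEmpty then false
  else
    let sample := PySem.List.slice rows none (some sample_size)   -- rows[:sample_size]
    pvLoopA group_by sample PySem.Dict.empty

-- ===== PORT B =====
-- normalized key of one row: "NULL" if row.get(group_by) is None else str(row.get(group_by))
def pvKeyB (group_by : String) (row : List (String × String)) : String :=
  match (PySem.Dict.mk row).get? group_by with
  | none => "NULL"
  | some v => v

def is_grouped_once_py_alt (rows : List (List (String × String))) (group_by : String) (sample_size : Int) : Bool :=
  if rows.isEmpty then false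
  else
    let sample := PySem.List.slice rows none (some sample_size)   -- rows[:sample_size]
    let keys := PySem.List.sorted (sample.map (pvKeyB group_by)) (fun x => x) false   -- sorted(...)
    (keys.zip keys.tail).all (fun p => p.1 != p.2)                 -- all(a != b for a, b in zip(keys, keys[1:]))

-- ===== PRECONDITION & SPEC =====
def Spec_is_grouped_once_py (rows : List (List (String × String))) (group_by : String) (sample_size : Int) (out : Bool) : Prop := out = is_grouped_once_py_alt rows group_by sample_size
instance (rows : List (List (String × String))) (group_by : String) (sample_size : Int) (out : Bool) : Decidable (Spec_is_grouped_once_py rows group_by sample_size out) := by unfold Spec_is_grouped_once_py; infer_instance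

-- ===== CLAIM =====
def Claim_equal_is_grouped_once_py : Prop := ∀ (rows : List (List (String × String))) (group_by : String) (sample_size : Int), Dom_is_grouped_once_py rows group_by sample_size → Spec_is_grouped_once_py rows group_by sample_size (is_grouped_once_py rows group_by sample_size)

-- ===== LEMMAS AND PROOFS =====

-- in a ≤-sorted list, adjacent pairs all distinct ↔ no duplicates
theorem pv_adj_ne_iff_nodup (s : List String) (hs : s.Pairwise (· ≤ ·)) :
    ((s.zip s.tail).all (fun p => p.1 != p.2) = true) ↔ s.Nodup := by
  induction s with
  | nil => simp
  | cons x t ih =>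
      cases t with
      | nil => simp
      | cons y u =>
          have hxy : x ≤ y := (List.pairwise_cons.1 hs).1 _ List.mem_cons_self
          have hxall : ∀ z ∈ y :: u, x ≤ z := (List.pairwise_cons.1 hs).1
          have htail : (y :: u).Pairwise (· ≤ ·) := (List.pairwise_cons.1 hs).2
          have ih' := ih htail
          simp only [List.tail_cons, List.zip_cons_cons, List.all_cons, Bool.and_eq_true,
            bne_iff_ne, ne_eq, List.nodup_cons] at *
          constructor
          · rintro ⟨hne, hrest⟩
            refine ⟨?_, ih'.1 hrest⟩
            intro hmem
            rcases List.mem_cons.1 hmem with h | h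
            · exact hne h
            · -- x ∈ u, but x ≤ y ≤ every element of u forces x = y's successor chain: x < y ≤ x
              have hyx : y ≤ x := by
                have hyu : ∀ z ∈ u, y ≤ z := (List.pairwise_cons.1 htail).1
                exact hyu x h
              have hx_eq : x = y := le_antisymm hxy hyx
              exact hne hx_eq
          · rintro ⟨hnot, hnd⟩
            exact ⟨fun h => hnot (h ▸ List.mem_cons_self), ih'.2 hnd⟩

-- A's loop returns True iff the remaining normalized keys are pairwise distinct and unseen
theorem pv_loopA_iff (group_by : String) : ∀ (l : List (List (String × String))) (counts : PySem.Dict String Int),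
    (∀ k, 0 ≤ counts.getD k 0) →
    (pvLoopA group_by l counts = true ↔
      ((l.map (pvKeyB group_by)).Nodup ∧ ∀ k ∈ l.map (pvKeyB group_by), counts.getD k 0 = 0)) := by
  intro l
  induction l with
  | nil => intro counts _; simp [pvLoopA]
  | cons row rest ih =>
      intro counts hnn
      have hkey : (match (PySem.Dict.mk row).get? group_by with
          | none => "NULL" | some v => v) = pvKeyB group_by row := by
        simp [pvKeyB]
      simp only [pvLoopA, hkey]
      rw [PySem.Dict.getD_insert_self]
      by_cases hpos : 1 < counts.getD (pvKeyB group_by row) 0 + 1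
      · have h0 : counts.getD (pvKeyB group_by row) 0 ≠ 0 := by omega
        simp only [if_pos hpos, List.map_cons, List.nodup_cons]
        constructor
        · intro h; exact absurd h (by simp)
        · rintro ⟨_, hall⟩
          exact absurd (hall _ (List.mem_cons_self)) h0
      · have h0 : counts.getD (pvKeyB group_by row) 0 = 0 := by
          have := hnn (pvKeyB group_by row); omega
        have hnn' : ∀ k, 0 ≤ (counts.insert (pvKeyB group_by row) (counts.getD (pvKeyB group_by row) 0 + 1)).getD k 0 := by
          intro k
          rw [PySem.Dict.getD_insert]
          by_cases hk : k = pvKeyB group_by row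
          · simp [hk]; omega
          · simp [hk]; exact hnn k
        rw [if_neg hpos, ih _ hnn']
        simp only [List.map_cons, List.nodup_cons, List.mem_cons]
        constructor
        · rintro ⟨hnd, hall⟩
          have hnotin : pvKeyB group_by row ∉ rest.map (pvKeyB group_by) := by
            intro hmem
            have := hall _ hmem
            rw [PySem.Dict.getD_insert_self] at this
            omega
          refine ⟨⟨hnotin, hnd⟩, ?_⟩
          intro k hk
          rcases hk with hk | hk
          · rw [hk]; exact h0
          · have := hall _ hk
            rw [PySem.Dict.getD_insert] at this
            by_cases he : k = pvKeyB group_by row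
            · exact absurd (he ▸ hk) hnotin
            · rwa [if_neg he] at this
        · rintro ⟨⟨hnotin, hnd⟩, hall⟩
          refine ⟨hnd, ?_⟩
          intro k hk
          rw [PySem.Dict.getD_insert]
          have hne : k ≠ pvKeyB group_by row := fun he => hnotin (he ▸ hk)
          rw [if_neg hne]
          exact hall _ (Or.inr hk)

-- ===== VERDICT =====
theorem is_grouped_once_py_spec : Claim_equal_is_grouped_once_py := by
  intro rows group_by sample_size _
  unfold Spec_is_grouped_once_py
  unfold is_grouped_once_py is_grouped_once_py_alt
  by_cases hr : rows.isEmpty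
  · simp [hr]
  · simp only [if_neg hr]
    set sample := PySem.List.slice rows none (some sample_size) with hs
    set keys := PySem.List.sorted (sample.map (pvKeyB group_by)) (fun x => x) false with hk
    have hA := pv_loopA_iff group_by sample PySem.Dict.empty
      (fun k => by rw [PySem.Dict.getD_empty])
    have hperm : keys.Perm (sample.map (pvKeyB group_by)) := PySem.List.sorted_perm ..
    have hsorted : keys.Pairwise (· ≤ ·) := by
      have := PySem.List.sorted_pairwise (xs := sample.map (pvKeyB group_by)) (key := fun x => x)
      simpa using this
    have hB := pv_adj_ne_iff_nodup keys hsorted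
    have : pvLoopA group_by sample PySem.Dict.empty = true ↔
        ((keys.zip keys.tail).all (fun p => p.1 != p.2) = true) := by
      rw [hA, hB, hperm.nodup_iff]
      constructor
      · rintro ⟨h, _⟩; exact h
      · intro h; exact ⟨h, fun k _ => PySem.Dict.getD_empty ..⟩
    exact Bool.coe_iff_coe.mp this
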